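-- pv_equiv track=rewrite | github.com/iamkhaya/taxwise | taxwise/api/management/commands/seed.py | _extract_statistical_unit_and_general_rate_of_duty
-- ===== SOURCE A (Python) =====
-- def _extract_statistical_unit_and_general_rate_of_duty(quantity):
--     digits = [(i, c) for i, c in enumerate(str(quantity)) if c.isdigit()]
--     if len(digits) > 1:
--         general = str(quantity)[digits[1][0] :]
--         unit = str(quantity)[: 1 * digits[1][0]]
--         return unit, general
--     else:
--         return quantity, ""
-- ===== SOURCE B (Python) =====
-- def _span_nondigits(s):
--     """Split s into (longest non-digit prefix, remaining suffix)."""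
--     head = []
--     for c in s:
--         if c.isdigit():
--             break
--         head.append(c)
--     return "".join(head), s[len(head):]
--
--
-- def _extract_statistical_unit_and_general_rate_of_duty(quantity):
--     s = str(quantity)
--     head, rest = _span_nondigits(s)
--     if not rest:
--         return quantity, ""
--     mid, tail = _span_nondigits(rest[1:])
--     if not tail:
--         return quantity, ""
--     return head + rest[0] + mid, tail
-- ===== Notes on version B (the rewrite author's own statement) =====
-- stated objective: alternative
-- what changed: Replaces A's indexed list of all (position, digit) pairs and slicing the string at digits[1][0] with an index-free span decomposition: split off the non-digit prefix, one digit, the next non-digit run, and glue the pieces by concatenation, stopping at the second digit instead of scanning the whole string.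
import Mathlib
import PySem

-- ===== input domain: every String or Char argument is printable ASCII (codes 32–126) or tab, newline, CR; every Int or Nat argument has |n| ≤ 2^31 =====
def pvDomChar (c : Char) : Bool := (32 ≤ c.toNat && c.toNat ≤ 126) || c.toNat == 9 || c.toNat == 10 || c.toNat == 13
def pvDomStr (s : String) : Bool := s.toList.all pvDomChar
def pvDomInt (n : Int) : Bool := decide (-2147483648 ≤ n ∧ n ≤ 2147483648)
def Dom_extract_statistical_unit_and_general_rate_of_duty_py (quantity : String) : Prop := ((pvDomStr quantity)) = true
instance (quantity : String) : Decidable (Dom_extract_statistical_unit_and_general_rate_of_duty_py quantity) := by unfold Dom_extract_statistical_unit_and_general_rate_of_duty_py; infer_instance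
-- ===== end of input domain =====

-- B replaces A's indexed digit-position list and slice-at-index with an index-free
-- span decomposition (non-digit prefix / rest, twice) glued by concatenation
-- (objective: alternative). Both are total; return values only (no mutation).

-- ===== PORT A =====
def extract_statistical_unit_and_general_rate_of_duty_py (quantity : String) : String × String :=
  let s := quantity.toList
  let digits := (PySem.List.enumerate s 0).filter (fun p => PySem.Chars.isdigit p.2)
  if digits.length > 1 then
    let i := (digits[1]?.getD (0, ' ')).1   -- digits[1][0]; guarded by length > 1
    let general := String.ofList (PySem.List.slice s (some i) none)
    let unit := String.ofList (PySem.List.slice s none (some (1 * i)))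
    (unit, general)
  else
    (quantity, "")

-- ===== PORT B =====
-- Source B's helper _span_nondigits: longest non-digit prefix and the remaining suffix
def pvSpanND : List Char → List Char × List Char
  | [] => ([], [])
  | c :: rest =>
    if PySem.Chars.isdigit c then ([], c :: rest)
    else
      let (h, t) := pvSpanND rest
      (c :: h, t)

def extract_statistical_unit_and_general_rate_of_duty_py_alt (quantity : String) : String × String :=
  let s := quantity.toList
  let (head, rest) := pvSpanND s
  match rest with
  | [] => (quantity, "")
  | c :: rest' =>
    let (mid, tail) := pvSpanND rest'
    match tail with
    | [] => (quantity, "")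
    | _ => (String.ofList (head ++ c :: mid), String.ofList tail)

-- ===== PRECONDITION & SPEC =====
def Spec_extract_statistical_unit_and_general_rate_of_duty_py (quantity : String) (out : String × String) : Prop := out = extract_statistical_unit_and_general_rate_of_duty_py_alt quantity
instance (quantity : String) (out : String × String) : Decidable (Spec_extract_statistical_unit_and_general_rate_of_duty_py quantity out) := by unfold Spec_extract_statistical_unit_and_general_rate_of_duty_py; infer_instance

-- ===== CLAIM (what is proved, stated in full; the proofs are below) =====
def Claim_equal_extract_statistical_unit_and_general_rate_of_duty_py : Prop := ∀ (quantity : String), Dom_extract_statistical_unit_and_general_rate_of_duty_py quantity → Spec_extract_statistical_unit_and_general_rate_of_duty_py quantity (extract_statistical_unit_and_general_rate_of_duty_py quantity)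

-- ===== LEMMAS AND PROOFS =====

lemma pvSpanND_append (l : List Char) : (pvSpanND l).1 ++ (pvSpanND l).2 = l := by
  induction l with
  | nil => simp [pvSpanND]
  | cons c rest ih =>
    by_cases h : PySem.Chars.isdigit c <;> simp [pvSpanND, h, ih]

-- the filtered enumerate list, expressed through the span decomposition
lemma filter_enum_span (l : List Char) (i : Int) :
    (PySem.List.enumerate l i).filter (fun p => PySem.Chars.isdigit p.2)
      = match (pvSpanND l).2 with
        | [] => []
        | c :: r => (i + (pvSpanND l).1.length, c)
            :: (PySem.List.enumerate r (i + (pvSpanND l).1.length + 1)).filter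
                 (fun p => PySem.Chars.isdigit p.2) := by
  induction l generalizing i with
  | nil => simp [pvSpanND, PySem.List.enumerate_nil]
  | cons c rest ih =>
    rw [PySem.List.enumerate_cons, List.filter_cons]
    by_cases h : PySem.Chars.isdigit c
    · simp [pvSpanND, h]
    · have hsp : pvSpanND (c :: rest) = (c :: (pvSpanND rest).1, (pvSpanND rest).2) := by
        simp [pvSpanND, h]
      rw [ih (i + 1), hsp]
      cases hr : (pvSpanND rest).2 with
      | nil => simp [h]
      | cons c' r' =>
        simp [h]
        constructor
        · ring
        · have h1 : i + 1 + ((pvSpanND rest).1.length : Int) + 1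
              = i + (((pvSpanND rest).1.length : Int) + 1) + 1 := by ring
          rw [h1]

-- ===== VERDICT (by name: the statement is the Claim_ definition above) =====
theorem extract_statistical_unit_and_general_rate_of_duty_py_spec : Claim_equal_extract_statistical_unit_and_general_rate_of_duty_py := by
  intro quantity _
  unfold Spec_extract_statistical_unit_and_general_rate_of_duty_py
  unfold extract_statistical_unit_and_general_rate_of_duty_py
  unfold extract_statistical_unit_and_general_rate_of_duty_py_alt
  simp only
  have happ := pvSpanND_append quantity.toList
  rw [filter_enum_span quantity.toList 0]
  rcases hsp : pvSpanND quantity.toList with ⟨head, rest⟩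
  rw [hsp] at happ
  cases rest with
  | nil => simp
  | cons c rest' =>
    dsimp only
    have happ2 := pvSpanND_append rest'
    simp only [filter_enum_span rest' (0 + (head.length : Int) + 1)]
    rcases hsp2 : pvSpanND rest' with ⟨mid, tail⟩
    rw [hsp2] at happ2
    cases tail with
    | nil => simp
    | cons c2 t2 =>
      dsimp only
      simp only [List.length_cons, List.getElem?_cons_succ, List.getElem?_cons_zero]
      have hidx : (0 : Int) + (head.length : Int) + 1 + (mid.length : Int)
          = ((head.length + 1 + mid.length : Nat) : Int) := by push_cast; ring
      have hs : quantity.toList = (head ++ c :: mid) ++ c2 :: t2 := by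
        simp only [← happ, ← happ2]; simp
      have hlen : (head ++ c :: mid).length = head.length + 1 + mid.length := by
        simp; omega
      simp only [Option.getD_some, one_mul, hidx,
        PySem.List.slice_to_natCast, PySem.List.slice_from_natCast]
      rw [hs, List.take_left' hlen, List.drop_left' hlen]
      simp
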